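-- pv_equiv track=rewrite | github.com/yijizhao/SynRTP | utils/utils.py | whether_stop
-- ===== SOURCE A (Python) =====
-- def whether_stop(metric_lst = [], n=5, mode='maximize'):
--     # return True if best value occurred more than `n` steps ago
--     if len(metric_lst) < 1: return False
--
--     if mode == 'minimize':
--         metric_lst = [-x for x in metric_lst]
--
--     max_v = max(metric_lst)
--     first_max_idx = 0
--     for idx, v in enumerate(metric_lst):
--         if v == max_v:
--             first_max_idx = idx
--             break
--
--     return first_max_idx < len(metric_lst) - n
-- ===== SOURCE B (Python) =====
-- def whether_stop(metric_lst = [], n=5, mode='maximize'):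
--     # single pass: keep the running best and the index of its first occurrence
--     if not metric_lst:
--         return False
--     minimize = (mode == 'minimize')
--     best = metric_lst[0]
--     best_idx = 0
--     for idx in range(1, len(metric_lst)):
--         v = metric_lst[idx]
--         if (v < best) if minimize else (v > best):
--             best = v
--             best_idx = idx
--     return best_idx < len(metric_lst) - n
-- ===== Notes on version B (the rewrite author's own statement) =====
-- stated objective: simpler
-- what changed: Replaces A's three passes (optional negation map, max(), then a scan for the first index of the max) with one combined pass that maintains the running best and the index of its first occurrence, comparing strictly in the direction given by mode.
import Mathlib
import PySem

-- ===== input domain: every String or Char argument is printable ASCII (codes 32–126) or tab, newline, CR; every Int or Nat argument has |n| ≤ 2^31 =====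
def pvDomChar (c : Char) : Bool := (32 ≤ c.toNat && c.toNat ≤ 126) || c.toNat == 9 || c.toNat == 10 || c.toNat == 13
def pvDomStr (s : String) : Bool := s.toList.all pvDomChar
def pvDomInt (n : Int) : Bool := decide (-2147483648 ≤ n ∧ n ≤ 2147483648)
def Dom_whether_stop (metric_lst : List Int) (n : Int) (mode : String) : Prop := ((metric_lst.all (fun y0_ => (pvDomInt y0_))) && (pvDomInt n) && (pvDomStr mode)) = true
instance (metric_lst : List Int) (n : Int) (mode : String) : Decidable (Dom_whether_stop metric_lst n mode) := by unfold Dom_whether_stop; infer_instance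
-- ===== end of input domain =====

-- B replaces A's three passes (negation map, max(), first-index scan) by one combined scan; objective: simpler.

-- ===== PORT A =====
-- A's for-loop with break: first index (from the enumerate pairs) whose value equals max_v, else the initial 0.
def whetherFirstMax (max_v : Int) (acc : Int) : List (Int × Int) → Int
  | [] => acc
  | (idx, v) :: rest => if v == max_v then idx else whetherFirstMax max_v acc rest

def whether_stop (metric_lst : List Int) (n : Int) (mode : String) : Bool :=
  if (metric_lst.length : Int) < 1 then false
  else
    let ml := if mode == "minimize" then metric_lst.map (fun x => -x) else metric_lst
    match PySem.List.max? ml (fun y => y) with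
    | none => false
    | some max_v =>
      let first_max_idx := whetherFirstMax max_v 0 (PySem.List.enumerate ml)
      decide (first_max_idx < (ml.length : Int) - n)

-- ===== PORT B =====
-- B's single loop: running best and the index of its first occurrence, strict comparison by mode.
def bestScan (minimize : Bool) (best bestIdx idx : Int) : List Int → Int × Int
  | [] => (best, bestIdx)
  | v :: rest =>
    if (if minimize then v < best else v > best)
    then bestScan minimize v idx (idx + 1) rest
    else bestScan minimize best bestIdx (idx + 1) rest

def whether_stop_alt (metric_lst : List Int) (n : Int) (mode : String) : Bool :=
  match metric_lst with
  | [] => false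
  | h :: t =>
    let r := bestScan (mode == "minimize") h 0 1 t
    decide (r.2 < (metric_lst.length : Int) - n)

-- ===== PRECONDITION & SPEC =====
def Spec_whether_stop (metric_lst : List Int) (n : Int) (mode : String) (out : Bool) : Prop := out = whether_stop_alt metric_lst n mode
instance (metric_lst : List Int) (n : Int) (mode : String) (out : Bool) : Decidable (Spec_whether_stop metric_lst n mode out) := by unfold Spec_whether_stop; infer_instance

-- ===== CLAIM (what is proved, stated in full; the proofs are below) =====
def Claim_equal_whether_stop : Prop := ∀ (metric_lst : List Int) (n : Int) (mode : String), Dom_whether_stop metric_lst n mode → Spec_whether_stop metric_lst n mode (whether_stop metric_lst n mode)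

-- ===== LEMMAS AND PROOFS =====

/-- first index (0-based, as Int) of `m` in the list; 0 past the end if absent. -/
def fIdx (m : Int) : List Int → Int
  | [] => 0
  | v :: rest => if v = m then 0 else 1 + fIdx m rest

theorem condFalse (P Q : Prop) [Decidable P] [Decidable Q] :
    (if (false : Bool) then P else Q) = Q := by simp

theorem le_foldl_max_self (best : Int) (ys : List Int) : best ≤ ys.foldl max best := by
  induction ys generalizing best with
  | nil => simp
  | cons v rest ih => exact le_trans (le_max_left best v) (ih (max best v))

theorem bestScan_false_eq (ys : List Int) : ∀ (best bestIdx idx : Int),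
    bestScan false best bestIdx idx ys =
      (ys.foldl max best,
       if ys.foldl max best = best then bestIdx else idx + fIdx (ys.foldl max best) ys) := by
  induction ys with
  | nil => intro best bestIdx idx; simp [bestScan, List.foldl]
  | cons v rest ih =>
    intro best bestIdx idx
    simp only [bestScan, condFalse, List.foldl, ih]
    by_cases hv : v > best
    · have hmax : max best v = v := max_eq_right hv.le
      rw [if_pos hv, hmax]
      have hM : v ≤ rest.foldl max v := le_foldl_max_self v rest
      rw [if_neg (by omega : ¬ rest.foldl max v = best)]
      simp only [Prod.mk.injEq, fIdx]
      refine ⟨trivial, ?_⟩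
      by_cases hvM : v = rest.foldl max v
      · rw [if_pos hvM.symm, if_pos hvM]; ring
      · rw [if_neg (fun e => hvM e.symm), if_neg hvM]
        generalize fIdx (rest.foldl max v) rest = f
        ring
    · have hmax : max best v = best := max_eq_left (by omega)
      rw [if_neg hv, hmax]
      by_cases hMb : rest.foldl max best = best
      · rw [if_pos hMb, if_pos hMb]
      · have hbM : best < rest.foldl max best :=
          lt_of_le_of_ne (le_foldl_max_self best rest) (Ne.symm hMb)
        rw [if_neg hMb, if_neg hMb]
        simp only [Prod.mk.injEq, fIdx]
        refine ⟨trivial, ?_⟩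
        rw [if_neg (by omega : ¬ v = rest.foldl max best)]
        generalize fIdx (rest.foldl max best) rest = f
        ring

theorem bestScan_true_eq (ys : List Int) : ∀ (best bestIdx idx : Int),
    bestScan true best bestIdx idx ys =
      (- (bestScan false (-best) bestIdx idx (ys.map (fun x => -x))).1,
       (bestScan false (-best) bestIdx idx (ys.map (fun x => -x))).2) := by
  induction ys with
  | nil => intro best bestIdx idx; simp [bestScan]
  | cons v rest ih =>
    intro best bestIdx idx
    simp only [bestScan, List.map, condFalse, if_true, ih]
    by_cases hv : v < best
    · rw [if_pos hv, if_pos (by omega : -v > -best)]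
    · rw [if_neg hv, if_neg (by omega : ¬ -v > -best)]

theorem whetherFirstMax_enumerate (m : Int) (l : List Int) : ∀ (acc k : Int), m ∈ l →
    whetherFirstMax m acc (PySem.List.enumerate l k) = k + fIdx m l := by
  induction l with
  | nil => intro _ _ h; simp at h
  | cons v rest ih =>
    intro acc k hm
    rw [PySem.List.enumerate_cons]
    by_cases hv : v = m
    · simp [whetherFirstMax, fIdx, hv]
    · have hm' : m ∈ rest := by
        rcases List.mem_cons.mp hm with h | h
        · exact absurd h.symm hv
        · exact h
      simp only [whetherFirstMax, fIdx, if_neg hv, beq_iff_eq, ih acc (k + 1) hm']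
      ring

/-- Shared nonempty-list core: A's first-index-of-max equals B's single-pass index. -/
theorem core_eq (h : Int) (t : List Int) :
    fIdx (t.foldl max h) (h :: t) = (bestScan false h 0 1 t).2 := by
  rw [bestScan_false_eq]
  by_cases hM : t.foldl max h = h
  · simp [fIdx, hM]
  · have : ¬ h = t.foldl max h := fun e => hM e.symm
    simp [fIdx, hM, this]

theorem foldl_max_mem (h : Int) (t : List Int) : t.foldl max h ∈ h :: t := by
  have := PySem.List.max?_mem (xs := h :: t) (key := fun y => y) (m := t.foldl max h)
  exact this (by rw [PySem.List.max?_id_cons])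

-- ===== VERDICT (by name: the statement is the Claim_ definition above) =====
theorem whether_stop_spec : Claim_equal_whether_stop := by
  intro metric_lst n mode _
  unfold Spec_whether_stop whether_stop whether_stop_alt
  cases metric_lst with
  | nil => simp
  | cons h t =>
    rw [if_neg (by simp : ¬ ((h :: t).length : Int) < 1)]
    by_cases hmode : (mode == "minimize") = true
    · -- minimize: A works on the negated list; B's strict-< scan equals the max scan on the negated list
      simp only [hmode, if_pos, List.map]
      rw [PySem.List.max?_id_cons]
      dsimp only
      rw [whetherFirstMax_enumerate _ _ 0 0 (foldl_max_mem (-h) (t.map (fun x => -x))),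
          bestScan_true_eq, ← core_eq (-h) (t.map (fun x => -x))]
      simp [List.length_map]
    · simp only [Bool.not_eq_true] at hmode
      simp only [hmode, Bool.false_eq_true, if_false]
      rw [PySem.List.max?_id_cons]
      dsimp only
      rw [whetherFirstMax_enumerate _ _ 0 0 (foldl_max_mem h t), ← core_eq h t]
      simp
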